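-- pv_equiv track=rewrite | github.com/BillyWangwzx/fight | stage1_py3.py | detect_double
-- ===== SOURCE A (Python) =====
-- def detect_double(cards, minimum=-1):
--     combs = []
--     dic = {}
--     for card in cards:
--         dic[card] = dic.get(card, 0) + 1
--     for card in dic:
--         if dic[card] >= 2 and card > minimum:
--             combs.append([card] * 2)
--     return combs
-- ===== SOURCE B (Python) =====
-- def detect_double(cards, minimum=-1):
--     return [[card, card] for i, card in enumerate(cards)
--             if card not in cards[:i] and card in cards[i + 1:] and card > minimum]
-- ===== Notes on version B (the rewrite author's own statement) =====
-- stated objective: simpler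
-- what changed: Replaces the frequency-dict build plus key scan with a single positional comprehension: position i is kept iff its card does not occur in cards[:i] (first occurrence) and occurs again in cards[i+1:] (a duplicate) and exceeds minimum; no counting structure at all.
import Mathlib
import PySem

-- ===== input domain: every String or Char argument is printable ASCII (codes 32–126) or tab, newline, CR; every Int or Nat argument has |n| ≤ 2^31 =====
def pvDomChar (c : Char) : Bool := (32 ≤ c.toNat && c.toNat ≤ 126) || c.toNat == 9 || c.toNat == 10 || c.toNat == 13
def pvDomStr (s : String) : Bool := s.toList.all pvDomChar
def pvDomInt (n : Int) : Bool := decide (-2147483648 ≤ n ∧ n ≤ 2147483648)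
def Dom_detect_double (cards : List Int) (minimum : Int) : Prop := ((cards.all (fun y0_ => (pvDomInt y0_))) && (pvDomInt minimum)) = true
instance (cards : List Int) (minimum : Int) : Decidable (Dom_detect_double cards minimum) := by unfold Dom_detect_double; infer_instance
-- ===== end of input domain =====

-- B replaces the frequency dict with a single positional comprehension (i kept iff the card is absent from cards[:i], present in cards[i+1:], and > minimum); objective: simpler, same output order.


-- ===== PORT A =====
-- dic[card] in the second loop is ported as getD with default 0: card is drawn from dic.keys, so the lookup never raises.
def detect_double (cards : List Int) (minimum : Int) : List (List Int) :=
  let dic : PySem.Dict Int Int :=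
    cards.foldl (fun d card => d.insert card (d.getD card 0 + 1)) PySem.Dict.empty
  dic.keys.foldl
    (fun combs card =>
      if 2 ≤ dic.getD card 0 ∧ minimum < card then combs ++ [[card, card]] else combs)
    []

-- ===== PORT B =====
-- the comprehension is a filterMap over enumerate(cards); cards[:i] and cards[i+1:] are PySem slices
def detect_double_alt (cards : List Int) (minimum : Int) : List (List Int) :=
  (PySem.List.enumerate cards 0).filterMap (fun p =>
    if p.2 ∉ PySem.List.slice cards none (some p.1)
        ∧ p.2 ∈ PySem.List.slice cards (some (p.1 + 1)) none
        ∧ minimum < p.2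
      then some [p.2, p.2] else none)

-- ===== PRECONDITION & SPEC =====
def Spec_detect_double (cards : List Int) (minimum : Int) (out : List (List Int)) : Prop := out = detect_double_alt cards minimum
instance (cards : List Int) (minimum : Int) (out : List (List Int)) : Decidable (Spec_detect_double cards minimum out) := by unfold Spec_detect_double; infer_instance

-- ===== CLAIM (what is proved, stated in full; the proofs are below) =====
def Claim_equal_detect_double : Prop := ∀ (cards : List Int) (minimum : Int), Dom_detect_double cards minimum → Spec_detect_double cards minimum (detect_double cards minimum)

-- ===== LEMMAS AND PROOFS =====

-- common normal form: one structural recursion emitting [[c,c]] at each first occurrence that recurs later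
def pvF (minimum : Int) : List Int → List Int → List (List Int)
  | [], _ => []
  | c :: l, seen =>
      (if c ∉ seen ∧ c ∈ l ∧ minimum < c then [[c, c]] else []) ++ pvF minimum l (seen ++ [c])

-- shape of A's second loop: append-if over a list equals filter+map
theorem pv_foldl_ite_append_map {p : Int → Prop} [DecidablePred p]
    (l : List Int) (acc : List (List Int)) :
    l.foldl (fun combs c => if p c then combs ++ [[c, c]] else combs) acc
      = acc ++ (l.filter (fun c => decide (p c))).map (fun c => [c, c]) := by
  induction l generalizing acc with
  | nil => simp
  | cons c l ih =>
    by_cases h : p c <;> simp [List.foldl_cons, h, ih]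

-- every Set.update leaves its first argument as a prefix
theorem pv_update_prefix (l s : List Int) :
    ∃ t, PySem.Set.update s l = s ++ t := by
  induction l generalizing s with
  | nil => exact ⟨[], by simp [PySem.Set.update]⟩
  | cons c l ih =>
    by_cases h : c ∈ s
    · have hadd : PySem.Set.add s c = s := by simp [PySem.Set.add, h]
      rcases ih s with ⟨t, ht⟩
      refine ⟨t, ?_⟩
      simp only [PySem.Set.update, List.foldl_cons, hadd] at ht ⊢
      exact ht
    · have hadd : PySem.Set.add s c = s ++ [c] := by simp [PySem.Set.add, h]
      rcases ih (s ++ [c]) with ⟨t, ht⟩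
      refine ⟨c :: t, ?_⟩
      simp only [PySem.Set.update, List.foldl_cons, hadd] at ht ⊢
      simpa using ht

theorem pv_ofList_append_singleton (seen : List Int) (c : Int) :
    PySem.Set.ofList (seen ++ [c]) = PySem.Set.add (PySem.Set.ofList seen) c := by
  simp [PySem.Set.ofList_eq_foldl, List.foldl_append]

theorem pv_counter_filter_eq_pvF (cards : List Int) (minimum : Int) :
    ∀ (l seen : List Int), cards = seen ++ l →
    (((PySem.Set.update (PySem.Set.ofList seen) l).drop (PySem.Set.ofList seen).length).filter
        (fun c => decide (2 ≤ (cards.count c : Int) ∧ minimum < c))).map (fun c => [c, c])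
      = pvF minimum l seen := by
  intro l
  induction l with
  | nil => intro seen _; simp [pvF, PySem.Set.update]
  | cons c l ih =>
    intro seen hc
    by_cases h : c ∈ seen
    · have hmem : c ∈ PySem.Set.ofList seen := by
        simpa [PySem.Set.mem_ofList] using h
      have hadd : PySem.Set.add (PySem.Set.ofList seen) c = PySem.Set.ofList seen := by
        simp [PySem.Set.add, hmem]
      have hup : PySem.Set.update (PySem.Set.ofList seen) (c :: l)
          = PySem.Set.update (PySem.Set.ofList seen) l := by
        simp only [PySem.Set.update, List.foldl_cons, hadd]
      have hof : PySem.Set.ofList (seen ++ [c]) = PySem.Set.ofList seen := by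
        rw [pv_ofList_append_singleton, hadd]
      have := ih (seen ++ [c]) (by simpa using hc)
      rw [hof] at this
      rw [hup, this]
      simp [pvF, h]
    · have hmem : c ∉ PySem.Set.ofList seen := by
        simpa [PySem.Set.mem_ofList] using h
      have hadd : PySem.Set.add (PySem.Set.ofList seen) c = PySem.Set.ofList seen ++ [c] := by
        simp [PySem.Set.add, hmem]
      have hof : PySem.Set.ofList (seen ++ [c]) = PySem.Set.ofList seen ++ [c] := by
        rw [pv_ofList_append_singleton, hadd]
      have hup : PySem.Set.update (PySem.Set.ofList seen) (c :: l)
          = PySem.Set.update (PySem.Set.ofList seen ++ [c]) l := by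
        simp only [PySem.Set.update, List.foldl_cons, hadd]
      rcases pv_update_prefix l (PySem.Set.ofList seen ++ [c]) with ⟨t, ht⟩
      have hdrop : (PySem.Set.update (PySem.Set.ofList seen) (c :: l)).drop
          (PySem.Set.ofList seen).length = c :: t := by
        rw [hup, ht, List.append_assoc]
        simp
      have hdrop' : (PySem.Set.update (PySem.Set.ofList seen ++ [c]) l).drop
          (PySem.Set.ofList seen ++ [c]).length = t := by
        rw [ht]; exact List.drop_left
      have hcount : (2 ≤ (cards.count c : Int) ∧ minimum < c) ↔ (c ∈ l ∧ minimum < c) := by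
        subst hc
        have h0 : seen.count c = 0 := List.count_eq_zero.mpr h
        rw [List.count_append, h0, List.count_cons_self]
        constructor
        · rintro ⟨h2, hm⟩
          refine ⟨?_, hm⟩
          by_contra hnl
          rw [List.count_eq_zero.mpr hnl] at h2
          omega
        · rintro ⟨hl, hm⟩
          have : 0 < l.count c := List.count_pos_iff.mpr hl
          constructor
          · push_cast; omega
          · exact hm
      have hrest := ih (seen ++ [c]) (by simpa using hc)
      rw [hof] at hrest
      rw [hdrop]
      by_cases hp : c ∈ l ∧ minimum < c
      · rw [List.filter_cons_of_pos (by simp only [decide_eq_true_eq]; exact hcount.mpr hp)]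
        simp only [List.map_cons]
        rw [hdrop'] at hrest
        rw [hrest]
        simp [pvF, h, hp.1, hp.2]
      · rw [List.filter_cons_of_neg (by simp only [decide_eq_true_eq]; exact fun hx => hp (hcount.mp hx))]
        rw [hdrop'] at hrest
        rw [hrest]
        have : ¬ (c ∉ seen ∧ c ∈ l ∧ minimum < c) := by tauto
        simp [pvF, this]

-- B's comprehension equals pvF: slices of the fixed list at position |pre| are exactly pre / the tail
theorem pv_B_eq_pvF (cards : List Int) (minimum : Int) :
    ∀ (l pre : List Int), cards = pre ++ l →
    (PySem.List.enumerate l (pre.length : Int)).filterMap (fun p =>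
        if p.2 ∉ PySem.List.slice cards none (some p.1)
            ∧ p.2 ∈ PySem.List.slice cards (some (p.1 + 1)) none
            ∧ minimum < p.2
          then some [p.2, p.2] else none)
      = pvF minimum l pre := by
  intro l
  induction l with
  | nil => intro pre _; simp [pvF, PySem.List.enumerate]
  | cons c l ih =>
    intro pre hc
    rw [PySem.List.enumerate_cons, List.filterMap_cons]
    have htake : PySem.List.slice cards none (some (pre.length : Int)) = pre := by
      rw [PySem.List.slice_to_natCast, hc, List.take_left]
    have hdrop : PySem.List.slice cards (some (((pre ++ [c]).length : Nat) : Int)) none = l := by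
      rw [PySem.List.slice_from_natCast, hc]
      have h2 : pre ++ c :: l = (pre ++ [c]) ++ l := by simp
      rw [h2, List.drop_left]
    have hlen : (pre.length : Int) + 1 = (((pre ++ [c]).length : Nat) : Int) := by simp
    have hrest := ih (pre ++ [c]) (by simpa using hc)
    rw [hlen, htake, hdrop, hrest]
    by_cases hp : c ∉ pre ∧ c ∈ l ∧ minimum < c
    · rw [if_pos hp]; simp [pvF, hp.1, hp.2.1, hp.2.2]
    · rw [if_neg hp]; simp [pvF, hp]

-- ===== VERDICT (by name: the statement is the Claim_ definition above) =====
theorem detect_double_spec : Claim_equal_detect_double := by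
  intro cards minimum _
  unfold Spec_detect_double detect_double detect_double_alt
  rw [PySem.Dict.foldl_insert_getD_add_one_eq_counter]
  simp only [PySem.Dict.getD_counter, PySem.Dict.keys_counter]
  rw [pv_foldl_ite_append_map (p := fun c => 2 ≤ ((cards.count c : Int)) ∧ minimum < c)]
  have hB := pv_B_eq_pvF cards minimum cards [] (by simp)
  simp only [List.length_nil, Nat.cast_zero] at hB
  rw [hB]
  have hA := pv_counter_filter_eq_pvF cards minimum cards [] (by simp)
  simpa [PySem.Set.update, PySem.Set.ofList_eq_foldl] using hA
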